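-- pv_equiv track=rewrite | github.com/sonavaneyash75-cpu/sheets | double_row_column_rail_fence.py | double_rail_fence_decrypt
-- ===== SOURCE A (Python) =====
-- def double_rail_fence_decrypt(ciphertext: str, rails: int) -> str:
--     """
--     Decrypts the ciphertext using the Double Row Column Rail Fence cipher.
--
--     Args:
--         ciphertext: The message to decrypt.
--         rails: The number of rails (rows) for the first stage.
--
--     Returns:
--         The resulting plaintext.
--     """
--     n = len(ciphertext)
--
--     # 1. Reverse Columnar Transposition
--
--     base_len = n // rails
--     remainder = n % rails
--
--     col_lengths = [base_len + 1] * remainder + [base_len] * (rails - remainder)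
--
--     blocks = []
--     start_index = 0
--     for length in col_lengths:
--         blocks.append(ciphertext[start_index:start_index + length])
--         start_index += length
--
--     intermediate_plaintext = [''] * n
--     block_indices = [0] * rails
--
--     for i in range(n):
--         block_index = i % rails
--
--         char = blocks[block_index][block_indices[block_index]]
--         intermediate_plaintext[i] = char
--
--         block_indices[block_index] += 1
--
--     intermediate_plaintext = "".join(intermediate_plaintext)
--
--     # 2. Reverse Standard Rail Fence Transposition (Rows)
--
--     grid_pos = [['\n' for _ in range(n)] for _ in range(rails)]
--
--     row, col = 0, 0
--     direction_down = True
--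
--     for i in range(n):
--         grid_pos[row][col] = '*'
--         col += 1
--
--         if row == 0:
--             direction_down = True
--         elif row == rails - 1:
--             direction_down = False
--
--         if direction_down:
--             row += 1
--         else:
--             row -= 1
--
--     index = 0
--     for r in range(rails):
--         for c in range(n):
--             if grid_pos[r][c] == '*':
--                 grid_pos[r][c] = intermediate_plaintext[index]
--                 index += 1
--
--     final_plaintext = []
--     row, col = 0, 0
--     direction_down = True
--
--     for i in range(n):
--         final_plaintext.append(grid_pos[row][col])
--         col += 1
--
--         if row == 0:
--             direction_down = True
--         elif row == rails - 1:
--             direction_down = False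
--
--         if direction_down:
--             row += 1
--         else:
--             row -= 1
--
--     return "".join(final_plaintext)
-- ===== SOURCE B (Python) =====
-- def double_rail_fence_decrypt(ciphertext: str, rails: int) -> str:
--     """Closed-form decrypt: for each output position compute its source index
--     in the ciphertext directly (no rails x n grid), one O(1) step per char."""
--     n = len(ciphertext)
--     if n <= 1:
--         return ciphertext
--     base, rem = divmod(n, rails)
--     cycle = 2 * rails - 2
--     q, p = divmod(n, cycle)
--
--     def src(i):
--         r = i % cycle
--         row = r if r < rails else cycle - r
--         if row == 0:
--             k = i // cycle
--         else:
--             start = q * (2 * row - 1) + min(p, row) + max(0, p - (cycle - row + 1))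
--             occ = (i // cycle) * (1 if row == rails - 1 else 2) + (0 if r < rails else 1)
--             k = start + occ
--         b = k % rails
--         return b * base + min(b, rem) + k // rails
--
--     return ''.join(ciphertext[src(i)] for i in range(n))
-- ===== Notes on version B (the rewrite author's own statement) =====
-- stated objective: faster
-- what changed: B computes each output character's source index in the ciphertext by a closed-form zigzag-row/rank/offset formula per position, instead of A's rails x n marker grid built and scanned by three zigzag/row-major simulation passes plus per-block counters.
import Mathlib
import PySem

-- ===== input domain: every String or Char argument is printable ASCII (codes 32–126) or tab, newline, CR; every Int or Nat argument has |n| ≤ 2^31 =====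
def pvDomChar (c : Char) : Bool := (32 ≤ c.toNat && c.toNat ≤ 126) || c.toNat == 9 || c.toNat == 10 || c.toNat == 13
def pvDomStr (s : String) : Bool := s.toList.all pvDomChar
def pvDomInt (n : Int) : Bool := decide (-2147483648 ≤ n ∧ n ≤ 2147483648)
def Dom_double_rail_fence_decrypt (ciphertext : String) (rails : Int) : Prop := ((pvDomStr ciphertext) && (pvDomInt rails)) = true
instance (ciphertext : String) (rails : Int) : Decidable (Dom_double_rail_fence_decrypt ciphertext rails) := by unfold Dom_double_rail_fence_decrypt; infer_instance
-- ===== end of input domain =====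

-- B replaces A's rails×n grid and its three simulation passes by a closed-form
-- source-index computation per output position (O(n) instead of O(rails·n)); measured faster.

-- ===== PORT A =====
-- shared zigzag state update of A's two identical (row, col, direction_down) blocks
def pvZigStep (rails : Int) (s : Int × Int × Bool) : Int × Int × Bool :=
  let dir := if s.1 = 0 then true else if s.1 = rails - 1 then false else s.2.2
  (if dir then s.1 + 1 else s.1 - 1, (s.2.1 + 1, dir))

-- literal port of A; intermediate_plaintext's [''] placeholders become ' ' chars
-- (every slot is overwritten before use on inputs where A returns)
def double_rail_fence_decrypt (ciphertext : String) (rails : Int) : String :=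
  let cs := ciphertext.toList
  let n : Int := (cs.length : Int)
  let base_len := PySem.Int.floordiv n rails
  let remainder := PySem.Int.mod n rails
  let col_lengths : List Int :=
    List.replicate remainder.toNat (base_len + 1) ++ List.replicate (rails - remainder).toNat base_len
  let bs := col_lengths.foldl
    (fun (st : List (List Char) × Int) len =>
      (st.1 ++ [PySem.List.slice cs (some st.2) (some (st.2 + len))], st.2 + len))
    ([], 0)
  let blocks := bs.1
  let ip := (PySem.List.pyRange 0 n 1).foldl
    (fun (st : List Char × List Int) i =>
      let bi := PySem.Int.mod i rails
      let ch := PySem.List.pyGetD (PySem.List.pyGetD blocks bi []) (PySem.List.pyGetD st.2 bi 0) ' '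
      (st.1.set i.toNat ch, st.2.set bi.toNat (PySem.List.pyGetD st.2 bi 0 + 1)))
    (List.replicate cs.length ' ', List.replicate rails.toNat 0)
  let intermediate := ip.1
  let grid0 : List (List Char) := List.replicate rails.toNat (List.replicate cs.length '\n')
  let mark := (PySem.List.pyRange 0 n 1).foldl
    (fun (st : List (List Char) × Int × Int × Bool) _ =>
      (st.1.set st.2.1.toNat ((PySem.List.pyGetD st.1 st.2.1 []).set st.2.2.1.toNat '*'),
       pvZigStep rails st.2))
    (grid0, (0, 0, true))
  let fill := (PySem.List.pyRange 0 rails 1).foldl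
    (fun (st : List (List Char) × Int) r =>
      (PySem.List.pyRange 0 n 1).foldl
        (fun (st : List (List Char) × Int) c =>
          if PySem.List.pyGetD (PySem.List.pyGetD st.1 r []) c ' ' = '*' then
            (st.1.set r.toNat ((PySem.List.pyGetD st.1 r []).set c.toNat
               (PySem.List.pyGetD intermediate st.2 ' ')), st.2 + 1)
          else st) st)
    (mark.1, 0)
  let read := (PySem.List.pyRange 0 n 1).foldl
    (fun (st : List Char × Int × Int × Bool) _ =>
      (st.1 ++ [PySem.List.pyGetD (PySem.List.pyGetD fill.1 st.2.1 []) st.2.2.1 ' '], pvZigStep rails st.2))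
    ([], (0, 0, true))
  String.ofList read.1

-- ===== PORT B =====
def double_rail_fence_decrypt_alt (ciphertext : String) (rails : Int) : String :=
  let cs := ciphertext.toList
  let n : Int := (cs.length : Int)
  if n ≤ 1 then ciphertext
  else
    let base := PySem.Int.floordiv n rails
    let rem := PySem.Int.mod n rails
    let cycle := 2 * rails - 2
    let q := PySem.Int.floordiv n cycle
    let p := PySem.Int.mod n cycle
    let src : Int → Int := fun i =>
      let r := PySem.Int.mod i cycle
      let row := if r < rails then r else cycle - r
      let k :=
        if row = 0 then PySem.Int.floordiv i cycle
        else
          let start := q * (2 * row - 1) + min p row + max 0 (p - (cycle - row + 1))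
          let occ := PySem.Int.floordiv i cycle * (if row = rails - 1 then 1 else 2) +
                     (if r < rails then 0 else 1)
          start + occ
      let b := PySem.Int.mod k rails
      b * base + min b rem + PySem.Int.floordiv k rails
    String.ofList ((PySem.List.pyRange 0 n 1).map (fun i => PySem.List.pyGetD cs (src i) ' '))

-- ===== PRECONDITION & SPEC =====
-- Pre_ excludes exactly the inputs where A raises: rails = 0 (ZeroDivisionError) and
-- rails < 2 with len(ciphertext) ≥ 2 resp. rails < 1 with len(ciphertext) = 1 (IndexError
-- in the zigzag, whose row index leaves the grid when there are fewer than 2 rails).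
def Pre_double_rail_fence_decrypt (ciphertext : String) (rails : Int) : Prop :=
  2 ≤ rails ∨ (ciphertext.toList.length = 0 ∧ rails ≠ 0) ∨ (ciphertext.toList.length = 1 ∧ 1 ≤ rails)
instance (ciphertext : String) (rails : Int) : Decidable (Pre_double_rail_fence_decrypt ciphertext rails) := by
  unfold Pre_double_rail_fence_decrypt; infer_instance

def pvWitness_double_rail_fence_decrypt : String × Int := ("HELLO WORLD", 3)

def Spec_double_rail_fence_decrypt (ciphertext : String) (rails : Int) (out : String) : Prop :=
  out = double_rail_fence_decrypt_alt ciphertext rails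
instance (ciphertext : String) (rails : Int) (out : String) : Decidable (Spec_double_rail_fence_decrypt ciphertext rails out) := by
  unfold Spec_double_rail_fence_decrypt; infer_instance

-- ===== CLAIM (what is proved, stated in full; the proofs are below) =====
def Claim_equal_double_rail_fence_decrypt : Prop := ∀ (ciphertext : String) (rails : Int), Dom_double_rail_fence_decrypt ciphertext rails → Pre_double_rail_fence_decrypt ciphertext rails → Spec_double_rail_fence_decrypt ciphertext rails (double_rail_fence_decrypt ciphertext rails)

-- ===== LEMMAS AND PROOFS =====

-- zigzag row of position i for R rails (R ≥ 2), cycle length 2R-2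
def zrow (R i : Nat) : Nat :=
  if i % (2*R-2) < R then i % (2*R-2) else (2*R-2) - i % (2*R-2)
-- direction_down entering iteration i
def edir (R i : Nat) : Bool :=
  if i = 0 then true else decide ((i-1) % (2*R-2) < R - 1)
-- number of positions j < N on a row strictly above w
def strtZ (R N w : Nat) : Nat := (List.range N).countP (fun j => decide (zrow R j < w))
-- number of positions j < c on row w
def rnkZ (R w c : Nat) : Nat := (List.range c).countP (fun j => decide (zrow R j = w))
-- position in intermediate_plaintext feeding output position i
def pvIdx (R N i : Nat) : Nat := strtZ R N (zrow R i) + rnkZ R (zrow R i) i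
-- source index in the ciphertext of intermediate position k (columnar stage)
def gidx (R N k : Nat) : Nat := (k % R) * (N / R) + min (k % R) (N % R) + k / R
-- the common value: output position i reads the ciphertext here
def pvSrc (R N i : Nat) : Nat := gidx R N (pvIdx R N i)

lemma zrow_lt (R i : Nat) (hR : 2 ≤ R) : zrow R i < R := by
  unfold zrow
  have h := Nat.mod_lt i (y := 2*R-2) (by omega)
  split <;> omega

lemma zrow_period (R i : Nat) : zrow R (i + (2*R-2)) = zrow R i := by
  unfold zrow
  rcases Nat.eq_zero_or_pos (2*R-2) with h | h
  · simp [h]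
  · rw [Nat.add_mod_right]

lemma succ_mod (i c : Nat) (hc : 0 < c) :
    (i+1) % c = (if i % c + 1 = c then 0 else i % c + 1) := by
  have hd := Nat.div_add_mod i c
  have h1 : i + 1 = i % c + 1 + c * (i / c) := by omega
  rw [h1, Nat.mul_comm, Nat.add_mul_mod_self_right]
  split
  · rename_i h; rw [h, Nat.mod_self]
  · exact Nat.mod_eq_of_lt (by have := Nat.mod_lt i hc; omega)

lemma succ_div (i c : Nat) (hc : 0 < c) :
    (i+1) / c = (if i % c + 1 = c then i / c + 1 else i / c) := by
  have hd := Nat.div_add_mod i c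
  have hm := Nat.mod_lt i hc
  split
  · rename_i h
    have h2 : c * (i / c + 1) = c * (i/c) + c := by ring
    have h1 : i + 1 = c * (i / c + 1) := by omega
    rw [h1, Nat.mul_div_cancel_left _ hc]
  · rename_i h
    have h1 : i + 1 = c * (i / c) + (i % c + 1) := by omega
    have h3 := Nat.div_eq_of_lt (show i % c + 1 < c by omega)
    rw [h1, Nat.mul_add_div hc, h3]
    omega

lemma cnt_lt (w m : Nat) : (List.range m).countP (fun j => decide (j < w)) = min w m := by
  induction m with
  | zero => simp
  | succ m ih =>
    rw [List.range_succ, List.countP_append, ih]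
    by_cases h : m < w <;> (simp [h]; omega)

lemma cnt_gt (a m : Nat) : (List.range m).countP (fun j => decide (a < j)) = m - min m (a+1) := by
  induction m with
  | zero => simp
  | succ m ih =>
    rw [List.range_succ, List.countP_append, ih]
    by_cases h : a < m <;> (simp [h]; omega)

lemma cnt_eq (a m : Nat) : (List.range m).countP (fun j => decide (j = a)) = if a < m then 1 else 0 := by
  induction m with
  | zero => simp
  | succ m ih =>
    rw [List.range_succ, List.countP_append, ih]
    by_cases h : m = a <;> simp [h] <;> split_ifs <;> omega

lemma countP_or_disjoint {α : Type} (p q : α → Bool) (l : List α)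
    (h : ∀ x ∈ l, ¬(p x = true ∧ q x = true)) :
    l.countP (fun x => p x || q x) = l.countP p + l.countP q := by
  induction l with
  | nil => simp
  | cons x l ih =>
    rw [List.countP_cons, List.countP_cons, List.countP_cons,
        ih (fun y hy => h y (List.mem_cons_of_mem x hy))]
    have := h x List.mem_cons_self
    by_cases hp : p x <;> by_cases hq : q x <;> simp [hp, hq] at this ⊢ <;> omega

lemma countP_mod_period (c : Nat) (hc : 0 < c) (f : Nat → Bool)
    (hf : ∀ j, f (j + c) = f j) (m : Nat) :
    (List.range m).countP f = (m / c) * (List.range c).countP f + (List.range (m % c)).countP f := by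
  induction m using Nat.strong_induction_on with
  | _ m ih =>
    by_cases h : m < c
    · rw [Nat.div_eq_of_lt h, Nat.mod_eq_of_lt h]; simp
    · have hcomp : ((f ∘ fun x => c + x)) = f := by
        funext j; simp only [Function.comp]; rw [Nat.add_comm, hf]
      have hm : m = c + (m - c) := by omega
      rw [hm, List.range_add, List.countP_append, List.countP_map, hcomp,
          ih (m - c) (by omega)]
      rw [Nat.add_comm c (m - c), Nat.add_div_right _ hc, Nat.add_mod_right]
      rw [Nat.succ_mul]
      omega

lemma range_countP_restrict (p : Nat → Bool) (i N : Nat) (h : i ≤ N) :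
    (List.range i).countP p = (List.range N).countP (fun j => decide (j < i) && p j) := by
  have hm : N = i + (N - i) := by omega
  rw [hm, List.range_add, List.countP_append, List.countP_map]
  have h1 : (List.range i).countP (fun j => decide (j < i) && p j) = (List.range i).countP p := by
    apply List.countP_congr
    intro x hx
    simp [List.mem_range] at hx
    simp [hx]
  have h2 : (List.range (N - i)).countP ((fun j => decide (j < i) && p j) ∘ fun x => i + x) = 0 := by
    apply List.countP_eq_zero.mpr
    intro x hx
    simp [Function.comp]
  rw [h1, h2]
  omega

lemma cnt_cycle_lt (R w : Nat) (hR : 2 ≤ R) (hw1 : 1 ≤ w) (hw2 : w < R) (m : Nat) (hm : m ≤ 2*R-2) :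
    (List.range m).countP (fun j => decide (zrow R j < w)) = min w m + (m - min m (2*R-2-w+1)) := by
  have h1 : (List.range m).countP (fun j => decide (zrow R j < w))
      = (List.range m).countP (fun j => decide (j < w) || decide (2*R-2-w < j)) := by
    apply List.countP_congr
    intro x hx
    simp only [List.mem_range] at hx
    have hxc : x % (2*R-2) = x := Nat.mod_eq_of_lt (by omega)
    unfold zrow
    rw [hxc]
    by_cases h : x < R <;> simp [h] <;> omega
  rw [h1, countP_or_disjoint _ _ _ (by intro x hx; simp; omega), cnt_lt, cnt_gt]

lemma cnt_cycle_eq (R w : Nat) (hR : 2 ≤ R) (hw2 : w < R) (m : Nat) (hm : m ≤ 2*R-2) :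
    (List.range m).countP (fun j => decide (zrow R j = w)) =
      (if w < m then 1 else 0) + (if 1 ≤ w ∧ w ≤ R-2 ∧ 2*R-2-w < m then 1 else 0) := by
  by_cases hmid : 1 ≤ w ∧ w ≤ R-2
  · have h1 : (List.range m).countP (fun j => decide (zrow R j = w))
        = (List.range m).countP (fun j => decide (j = w) || decide (j = 2*R-2-w)) := by
      apply List.countP_congr
      intro x hx
      simp only [List.mem_range] at hx
      have hxc : x % (2*R-2) = x := Nat.mod_eq_of_lt (by omega)
      unfold zrow
      rw [hxc]
      by_cases h : x < R <;> simp [h] <;> omega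
    rw [h1, countP_or_disjoint _ _ _ (by intro x hx; simp; omega), cnt_eq, cnt_eq]
    have : (1 ≤ w ∧ w ≤ R-2 ∧ 2*R-2-w < m) ↔ (2*R-2-w < m) := by constructor <;> (intros; omega)
    rw [if_congr this rfl rfl]
  · have h1 : (List.range m).countP (fun j => decide (zrow R j = w))
        = (List.range m).countP (fun j => decide (j = w)) := by
      apply List.countP_congr
      intro x hx
      simp only [List.mem_range] at hx
      have hxc : x % (2*R-2) = x := Nat.mod_eq_of_lt (by omega)
      unfold zrow
      rw [hxc]
      by_cases h : x < R <;> simp [h] <;> omega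
    rw [h1, cnt_eq]
    have h2 : ¬(1 ≤ w ∧ w ≤ R-2 ∧ 2*R-2-w < m) := by omega
    rw [if_neg h2]
    omega

lemma zrow_periodP (R : Nat) (w : Nat) :
    ∀ j, (fun j => decide (zrow R j = w)) (j + (2*R-2)) = (fun j => decide (zrow R j = w)) j := by
  intro j; simp [zrow_period]

lemma strtZ_closed (R N w : Nat) (hR : 2 ≤ R) (hw1 : 1 ≤ w) (hw2 : w < R) :
    strtZ R N w = (N / (2*R-2)) * (2*w-1)
      + min (N % (2*R-2)) w + (N % (2*R-2) - min (N % (2*R-2)) (2*R-2-w+1)) := by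
  unfold strtZ
  rw [countP_mod_period (2*R-2) (by omega) _ (by intro j; simp [zrow_period]) N]
  rw [cnt_cycle_lt R w hR hw1 hw2 (2*R-2) (by omega),
      cnt_cycle_lt R w hR hw1 hw2 (N % (2*R-2)) (by have := Nat.mod_lt N (y := 2*R-2) (by omega); omega)]
  have h3 : min w (N % (2*R-2)) = min (N % (2*R-2)) w := Nat.min_comm _ _
  have h2 : min w (2*R-2) + (2*R-2 - min (2*R-2) (2*R-2-w+1)) = 2*w-1 := by omega
  rw [h2, h3]
  omega

lemma strtZ_zero (R N : Nat) : strtZ R N 0 = 0 := by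
  unfold strtZ; simp

lemma rnkZ_closed (R i : Nat) (hR : 2 ≤ R) :
    rnkZ R (zrow R i) i = (i / (2*R-2)) * (if zrow R i = 0 ∨ zrow R i = R-1 then 1 else 2)
      + (if i % (2*R-2) < R then 0 else 1) := by
  have hc : 0 < 2*R-2 := by omega
  have hrlt := Nat.mod_lt i hc
  have hzlt := zrow_lt R i hR
  have hwv : (i % (2*R-2) < R ∧ zrow R i = i % (2*R-2)) ∨
      (¬(i % (2*R-2) < R) ∧ zrow R i = 2*R-2 - i % (2*R-2)) := by
    by_cases h : i % (2*R-2) < R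
    · left; exact ⟨h, by unfold zrow; rw [if_pos h]⟩
    · right; exact ⟨h, by unfold zrow; rw [if_neg h]⟩
  unfold rnkZ
  rw [countP_mod_period (2*R-2) hc _ (zrow_periodP R (zrow R i)) i]
  rw [cnt_cycle_eq R (zrow R i) hR hzlt (2*R-2) (by omega),
      cnt_cycle_eq R (zrow R i) hR hzlt (i % (2*R-2)) (by omega)]
  split_ifs <;> omega

lemma strtZ_succ (R N w : Nat) :
    strtZ R N (w+1) = strtZ R N w + rnkZ R w N := by
  unfold strtZ rnkZ
  have h1 : (List.range N).countP (fun j => decide (zrow R j < w+1))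
      = (List.range N).countP (fun j => decide (zrow R j < w) || decide (zrow R j = w)) := by
    apply List.countP_congr
    intro x _
    by_cases h : zrow R x < w + 1 <;> simp [h] <;> omega
  rw [h1, countP_or_disjoint _ _ _ (by intro x hx; simp; omega)]

lemma pvIdx_lt (R N i : Nat) (hR : 2 ≤ R) (hi : i < N) : pvIdx R N i < N := by
  unfold pvIdx strtZ rnkZ
  rw [range_countP_restrict _ i N (by omega)]
  rw [← countP_or_disjoint _ _ _ (by intro x hx; simp; omega)]
  have hne : (List.range N).countP (fun x => !decide (x = i)) = N - 1 := by
    have hlen := List.length_eq_countP_add_countP (l := List.range N) (p := fun x => decide (x = i))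
    have hlen' : N = (List.range N).countP (fun x => decide (x = i))
        + (List.range N).countP (fun x => !decide (x = i)) := by simpa using hlen
    rw [cnt_eq i N, if_pos hi] at hlen'
    omega
  refine Nat.lt_of_le_of_lt (List.countP_mono_left (q := fun x => !decide (x = i)) ?_) (by omega)
  intro x hx h
  simp only [Bool.or_eq_true, Bool.and_eq_true, decide_eq_true_eq] at h
  simp only [Bool.not_eq_true', decide_eq_false_iff_not]
  rcases h with h | ⟨h1, h2⟩
  · intro he; rw [he] at h; omega
  · omega

lemma pred_mod (i c : Nat) (hc : 0 < c) (h : 0 < i % c) : (i-1) % c = i % c - 1 := by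
  have hd := Nat.div_add_mod i c
  have hm := Nat.mod_lt i hc
  have h1 : i - 1 = (i % c - 1) + c * (i / c) := by omega
  rw [h1, Nat.add_mul_mod_self_left]
  exact Nat.mod_eq_of_lt (by omega)

lemma zrow_cases (R i : Nat) :
    (i % (2*R-2) < R ∧ zrow R i = i % (2*R-2)) ∨
      (¬(i % (2*R-2) < R) ∧ zrow R i = 2*R-2 - i % (2*R-2)) := by
  by_cases h : i % (2*R-2) < R
  · left; exact ⟨h, by unfold zrow; rw [if_pos h]⟩
  · right; exact ⟨h, by unfold zrow; rw [if_neg h]⟩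

lemma zrow_succ (R i : Nat) (hR : 2 ≤ R) :
    zrow R (i+1) = (if i % (2*R-2) < R - 1 then zrow R i + 1 else zrow R i - 1) := by
  have hc : 0 < 2*R-2 := by omega
  have hr := Nat.mod_lt i hc
  have hs := succ_mod i (2*R-2) hc
  have hzv := zrow_cases R i
  have hz1 : zrow R (i+1)
      = if (i+1) % (2*R-2) < R then (i+1) % (2*R-2) else 2*R-2 - (i+1) % (2*R-2) := rfl
  by_cases hwrap : i % (2*R-2) + 1 = 2*R-2
  · rw [hz1, hs, if_pos hwrap]; split_ifs <;> omega
  · rw [hz1, hs, if_neg hwrap]; split_ifs <;> omega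

lemma zrow_pos_of_up (R i : Nat) (hR : 2 ≤ R) (h : ¬(i % (2*R-2) < R - 1)) : 1 ≤ zrow R i := by
  have hc : 0 < 2*R-2 := by omega
  have hr := Nat.mod_lt i hc
  have hzv := zrow_cases R i
  omega

lemma zigStep_char (R i : Nat) (hR : 2 ≤ R) :
    pvZigStep (R:Int) (((zrow R i : Nat) : Int), ((i:Nat) : Int), edir R i)
      = (((zrow R (i+1) : Nat) : Int), (((i+1 : Nat)) : Int), edir R (i+1)) := by
  have hc : 0 < 2*R-2 := by omega
  have hr : i % (2*R-2) < 2*R-2 := Nat.mod_lt i hc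
  have hzv := zrow_cases R i
  have he1 : edir R (i+1) = decide (i % (2*R-2) < R - 1) := by unfold edir; simp
  have hdir : (if ((zrow R i : Nat) : Int) = 0 then true
        else if ((zrow R i : Nat) : Int) = (R:Int) - 1 then false else edir R i)
      = decide (i % (2*R-2) < R - 1) := by
    by_cases h0 : i % (2*R-2) = 0
    · rw [if_pos (by omega)]
      exact (decide_eq_true (by omega)).symm
    · have hi1 : 1 ≤ i := by by_contra h; simp at h; subst h; simp at h0
      have hed : edir R i = decide (i % (2*R-2) < R) := by
        unfold edir
        rw [if_neg (by omega), pred_mod i (2*R-2) hc (by omega)]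
        simp only [decide_eq_decide]
        omega
      by_cases hbot : i % (2*R-2) = R-1
      · rw [if_neg (by omega), if_pos (by omega)]
        exact (decide_eq_false (by omega)).symm
      · rw [if_neg (by omega), if_neg (by omega), hed]
        simp only [decide_eq_decide]
        omega
  unfold pvZigStep
  simp only []
  rw [hdir, he1]
  refine Prod.ext ?_ (Prod.ext (by push_cast; ring) rfl)
  simp only []
  rw [zrow_succ R i hR]
  by_cases hd : i % (2*R-2) < R - 1
  · rw [if_pos hd, if_pos (by exact decide_eq_true hd)]
    push_cast; ring
  · have h1 := zrow_pos_of_up R i hR hd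
    rw [if_neg hd, if_neg (by simp [hd])]
    omega

lemma zig_fold {α : Type} (R : Nat) (hR : 2 ≤ R) (h : α → Int → Int → α) (a0 : α) (m : Nat) :
    (((List.range m).map (fun k => ((k : Nat) : Int))).foldl
      (fun (st : α × Int × Int × Bool) _ => (h st.1 st.2.1 st.2.2.1, pvZigStep (R:Int) st.2))
      (a0, (0, 0, true)))
    = ((List.range m).foldl (fun a i => h a ((zrow R i : Nat) : Int) ((i : Nat) : Int)) a0,
       (((zrow R m : Nat) : Int), ((m : Nat) : Int), edir R m)) := by
  have h0 : zrow R 0 = 0 := by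
    unfold zrow
    simp only [Nat.zero_mod]
    rw [if_pos (by omega)]
  induction m generalizing a0 with
  | zero => simp [h0, edir]
  | succ m ih =>
    rw [List.range_succ, List.map_append, List.foldl_append, ih, List.foldl_append]
    simp [zigStep_char R m hR]

-- generic list helpers
lemma foldl_id {α β : Type} (l : List β) (init : α) :
    l.foldl (fun st _ => st) init = init := by
  induction l generalizing init with
  | nil => rfl
  | cons x l ih => simpa using ih init

lemma set_map_range {β : Type} (f : Nat → β) (m j : Nat) (v : β) :
    (List.map f (List.range m)).set j v
      = List.map (fun c => if c = j then v else f c) (List.range m) := by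
  apply List.ext_getElem (by simp)
  intro k h1 h2
  simp only [List.getElem_set, List.getElem_map, List.getElem_range]
  by_cases h : j = k
  · rw [if_pos h, if_pos h.symm]
  · rw [if_neg h, if_neg (fun hh => h hh.symm)]

lemma replicate_eq_map_range {β : Type} (m : Nat) (x : β) :
    List.replicate m x = (List.range m).map (fun _ => x) := by
  rw [List.map_const', List.length_range]

lemma getD_take_drop {α : Type} (l : List α) (S L q : Nat) (d : α)
    (h1 : q < L) (h2 : S + q < l.length) :
    (List.take L (List.drop S l)).getD q d = l.getD (S+q) d := by
  have hlen : q < (List.take L (List.drop S l)).length := by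
    simp only [List.length_take, List.length_drop]
    omega
  rw [List.getD_eq_getElem _ _ hlen, List.getD_eq_getElem _ _ h2]
  rw [List.getElem_take, List.getElem_drop]

-- stage 1: column lengths, offsets, blocks
def lenB (R N b : Nat) : Nat := if b < N % R then N/R + 1 else N/R
def offB (R N b : Nat) : Nat := b * (N/R) + min b (N % R)
def fillChar (cs : List Char) (R c : Nat) : Char :=
  cs.getD (gidx R cs.length (pvIdx R cs.length c)) ' '

lemma offB_zero (R N : Nat) : offB R N 0 = 0 := by unfold offB; simp

lemma offB_succ (R N b : Nat) : offB R N (b+1) = offB R N b + lenB R N b := by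
  unfold offB lenB
  have h : (b+1) * (N/R) = b * (N/R) + N/R := by ring
  rw [h]
  split_ifs <;> omega

lemma offB_R (R N : Nat) (hR : 0 < R) : offB R N R = N := by
  unfold offB
  have h1 := Nat.div_add_mod N R
  have h2 : min R (N % R) = N % R := by have := Nat.mod_lt N hR; omega
  have h3 : R * (N / R) = N / R * R := by ring
  omega

lemma offB_mono (R N b1 b2 : Nat) (h : b1 ≤ b2) : offB R N b1 ≤ offB R N b2 := by
  induction b2 with
  | zero => have h0 : b1 = 0 := Nat.le_zero.mp h; rw [h0]
  | succ b ih =>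
    rcases Nat.lt_or_ge b1 (b+1) with h' | h'
    · have := ih (by omega)
      rw [offB_succ]
      omega
    · have hb : b1 = b + 1 := by omega
      rw [hb]

lemma div_lt_lenB (R N m : Nat) (hR : 0 < R) (hm : m < N) : m / R < lenB R N (m % R) := by
  have hq : m / R ≤ N / R := Nat.div_le_div_right (by omega)
  have e1 := Nat.div_add_mod m R
  have e2 := Nat.div_add_mod N R
  unfold lenB
  by_cases h : m / R = N / R
  · rw [h] at e1
    split_ifs <;> omega
  · split_ifs <;> omega

lemma gidx_eq_off (R N m : Nat) : gidx R N m = offB R N (m % R) + m / R := by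
  unfold gidx offB; ring

lemma gidx_lt (R N m : Nat) (hR : 0 < R) (hm : m < N) : gidx R N m < N := by
  rw [gidx_eq_off]
  have h1 := div_lt_lenB R N m hR hm
  have h2 := offB_succ R N (m % R)
  have h3 := offB_mono R N (m % R + 1) R (by have := Nat.mod_lt m hR; omega)
  have h4 := offB_R R N hR
  omega

lemma col_lengths_eq (R N : Nat) (hR : 2 ≤ R) :
    List.replicate (PySem.Int.mod (N:Int) (R:Int)).toNat (PySem.Int.floordiv (N:Int) (R:Int) + 1)
      ++ List.replicate ((R:Int) - PySem.Int.mod (N:Int) (R:Int)).toNat (PySem.Int.floordiv (N:Int) (R:Int))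
    = (List.range R).map (fun b => ((lenB R N b : Nat) : Int)) := by
  rw [PySem.Int.mod_natCast, PySem.Int.floordiv_natCast]
  have hmod : N % R < R := Nat.mod_lt N (by omega)
  have h1 : (((N % R : Nat) : Int)).toNat = N % R := by omega
  have h2 : ((R:Int) - ((N % R : Nat):Int)).toNat = R - N % R := by omega
  rw [h1, h2]
  apply List.ext_getElem (by simp; omega)
  intro k hk1 hk2
  simp only [List.length_range] at hk2
  unfold lenB
  by_cases h : k < N % R
  · rw [List.getElem_append_left (by simp; omega), List.getElem_replicate,
        List.getElem_map, List.getElem_range, if_pos h]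
    push_cast; ring
  · rw [List.getElem_append_right (by simp; omega), List.getElem_replicate,
        List.getElem_map, List.getElem_range, if_neg h]

lemma blocks_fold (cs : List Char) (L : Nat → Nat) (S : Nat → Nat) (hS0 : S 0 = 0)
    (hSs : ∀ b, S (b+1) = S b + L b) (B : Nat) :
    ((List.range B).map (fun b => ((L b : Nat) : Int))).foldl
      (fun (st : List (List Char) × Int) len =>
        (st.1 ++ [PySem.List.slice cs (some st.2) (some (st.2 + len))], st.2 + len))
      ([], 0)
    = ((List.range B).map (fun b => (cs.drop (S b)).take (L b)), ((S B : Nat) : Int)) := by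
  induction B with
  | zero => simp [hS0]
  | succ B ih =>
    rw [List.range_succ, List.map_append, List.foldl_append, ih, List.map_append]
    simp only [List.map_cons, List.map_nil, List.foldl_cons, List.foldl_nil]
    refine Prod.ext ?_ ?_
    · simp only []
      rw [PySem.List.slice_natCast_add]
    · simp only [hSs]
      push_cast; ring

def blocksE (R : Nat) (cs : List Char) : List (List Char) :=
  (List.range R).map (fun b => (cs.drop (offB R cs.length b)).take (lenB R cs.length b))

lemma ip_fold (cs : List Char) (R : Nat) (hR : 2 ≤ R) (m : Nat) (hm : m ≤ cs.length) :
    ((List.range m).map (fun k => ((k : Nat) : Int))).foldl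
      (fun (st : List Char × List Int) i =>
        (st.1.set i.toNat
           (PySem.List.pyGetD
             (PySem.List.pyGetD (blocksE R cs) (PySem.Int.mod i (R:Int)) [])
             (PySem.List.pyGetD st.2 (PySem.Int.mod i (R:Int)) 0) ' '),
         st.2.set (PySem.Int.mod i (R:Int)).toNat
           (PySem.List.pyGetD st.2 (PySem.Int.mod i (R:Int)) 0 + 1)))
      (List.replicate cs.length ' ', List.replicate R (0:Int))
    = ((List.range cs.length).map
         (fun j => if j < m then cs.getD (gidx R cs.length j) ' ' else ' '),
       (List.range R).map (fun b => (((m / R + if b < m % R then 1 else 0 : Nat)) : Int))) := by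
  induction m with
  | zero =>
    simp only [List.range_zero, List.map_nil, List.foldl_nil]
    refine Prod.ext ?_ ?_
    · simp only [Nat.not_lt_zero, if_false]
      rw [← replicate_eq_map_range]
    · simp only [Nat.zero_div, Nat.zero_mod, Nat.not_lt_zero, if_false, Nat.add_zero,
        Nat.cast_zero]
      rw [← replicate_eq_map_range]
  | succ m ih =>
    have hmlt : m < cs.length := by omega
    have hmodR : m % R < R := Nat.mod_lt m (by omega)
    rw [List.range_succ, List.map_append, List.foldl_append, ih (by omega)]
    simp only [List.map_cons, List.map_nil, List.foldl_cons, List.foldl_nil]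
    have hmR : PySem.Int.mod ((m:Nat):Int) (R:Int) = ((m % R : Nat) : Int) :=
      PySem.Int.mod_natCast m R
    rw [hmR]
    have hcnt : PySem.List.pyGetD
        ((List.range R).map (fun b => (((m / R + if b < m % R then 1 else 0 : Nat)) : Int)))
        ((m % R : Nat) : Int) 0 = ((m / R : Nat) : Int) := by
      rw [PySem.List.pyGetD_natCast, PySem.List.getD_map_range _ _ _ _ hmodR, if_neg (by omega)]
      omega
    have hblk : PySem.List.pyGetD (blocksE R cs) ((m % R : Nat) : Int) []
        = (cs.drop (offB R cs.length (m % R))).take (lenB R cs.length (m % R)) := by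
      unfold blocksE
      rw [PySem.List.pyGetD_natCast, PySem.List.getD_map_range _ _ _ _ hmodR]
    have hch : PySem.List.pyGetD
        ((cs.drop (offB R cs.length (m % R))).take (lenB R cs.length (m % R)))
        ((m / R : Nat) : Int) ' ' = cs.getD (gidx R cs.length m) ' ' := by
      rw [PySem.List.pyGetD_natCast]
      rw [getD_take_drop cs _ _ _ _ (div_lt_lenB R cs.length m (by omega) hmlt)
            (by have := gidx_lt R cs.length m (by omega) hmlt; rw [gidx_eq_off] at this; omega)]
      rw [← gidx_eq_off]
    rw [hcnt, hblk, hch]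
    refine Prod.ext ?_ ?_
    · simp only [Int.toNat_natCast]
      rw [set_map_range]
      apply List.map_congr_left
      intro c hc
      simp only [List.mem_range] at hc
      by_cases h : c = m
      · subst h; rw [if_pos rfl, if_pos (Nat.lt_succ_self c)]
      · rw [if_neg h]
        by_cases h2 : c < m
        · rw [if_pos h2, if_pos (by omega)]
        · rw [if_neg h2, if_neg (by omega)]
    · simp only [Int.toNat_natCast]
      have hval : ((m / R : Nat) : Int) + 1 = (((m / R + 1 : Nat)) : Int) := by push_cast; ring
      rw [hval, set_map_range]
      apply List.map_congr_left
      intro b hb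
      simp only [List.mem_range] at hb
      rw [succ_div m R (by omega), succ_mod m R (by omega)]
      split_ifs <;> push_cast <;> omega

def gridM (R N m : Nat) : List (List Char) :=
  (List.range R).map (fun r => (List.range N).map
    (fun c => if c < m ∧ zrow R c = r then '*' else '\n'))

def gridF (cs : List Char) (R r c : Nat) : List (List Char) :=
  (List.range R).map (fun r' => (List.range cs.length).map
    (fun cc => if zrow R cc = r' then
        (if r' < r ∨ (r' = r ∧ cc < c) then fillChar cs R cc else '*') else '\n'))

lemma rnk_succ (R w c : Nat) :
    rnkZ R w (c+1) = rnkZ R w c + (if zrow R c = w then 1 else 0) := by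
  unfold rnkZ
  rw [List.range_succ, List.countP_append]
  by_cases h : zrow R c = w <;> simp [h]

lemma mark_fold (R N : Nat) (hR : 2 ≤ R) (m : Nat) (hm : m ≤ N) :
    (List.range m).foldl
      (fun g i => g.set ((zrow R i : Nat) : Int).toNat
         ((PySem.List.pyGetD g ((zrow R i : Nat) : Int) []).set ((i : Nat) : Int).toNat '*'))
      (List.replicate R (List.replicate N '\n'))
    = gridM R N m := by
  induction m with
  | zero =>
    unfold gridM
    simp only [List.range_zero, List.foldl_nil, Nat.not_lt_zero, false_and, if_false]
    rw [replicate_eq_map_range]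
    apply List.map_congr_left
    intro r _
    rw [replicate_eq_map_range]
  | succ m ih =>
    rw [List.range_succ, List.foldl_append, ih (by omega)]
    simp only [List.foldl_cons, List.foldl_nil, Int.toNat_natCast]
    have hz := zrow_lt R m hR
    have hrow : PySem.List.pyGetD (gridM R N m) ((zrow R m : Nat) : Int) []
        = (List.range N).map (fun c => if c < m ∧ zrow R c = zrow R m then '*' else '\n') := by
      unfold gridM
      rw [PySem.List.pyGetD_natCast, PySem.List.getD_map_range _ _ _ _ hz]
    rw [hrow, set_map_range]
    unfold gridM
    rw [set_map_range]
    apply List.map_congr_left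
    intro r hr
    simp only [List.mem_range] at hr
    by_cases h : r = zrow R m
    · subst h
      rw [if_pos rfl]
      apply List.map_congr_left
      intro c hc
      simp only [List.mem_range] at hc
      by_cases h2 : c = m
      · subst h2
        rw [if_pos rfl, if_pos ⟨by omega, rfl⟩]
      · rw [if_neg h2]
        by_cases h3 : c < m ∧ zrow R c = zrow R m
        · rw [if_pos h3, if_pos ⟨by omega, h3.2⟩]
        · rw [if_neg h3, if_neg (fun hh => h3 ⟨by omega, hh.2⟩)]
    · rw [if_neg h]
      apply List.map_congr_left
      intro c hc
      simp only [List.mem_range] at hc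
      by_cases h3 : c < m ∧ zrow R c = r
      · rw [if_pos h3, if_pos ⟨by omega, h3.2⟩]
      · rw [if_neg h3, if_neg (by
          intro hh
          apply h3
          refine ⟨?_, hh.2⟩
          rcases Nat.lt_or_ge c m with h4 | h4
          · exact h4
          · exfalso
            have hcm : c = m := by omega
            subst hcm
            exact h hh.2.symm)]

lemma gridF_entry (cs : List Char) (R r c r' c' : Nat) (hr' : r' < R) (hc' : c' < cs.length) :
    PySem.List.pyGetD (PySem.List.pyGetD (gridF cs R r c) ((r' : Nat) : Int) []) ((c' : Nat) : Int) ' '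
      = (if zrow R c' = r' then
          (if r' < r ∨ (r' = r ∧ c' < c) then fillChar cs R c' else '*') else '\n') := by
  have h1 : PySem.List.pyGetD (gridF cs R r c) ((r' : Nat) : Int) []
      = (List.range cs.length).map
          (fun cc => if zrow R cc = r' then
            (if r' < r ∨ (r' = r ∧ cc < c) then fillChar cs R cc else '*') else '\n') := by
    unfold gridF
    rw [PySem.List.pyGetD_natCast, PySem.List.getD_map_range _ _ _ _ hr']
  rw [h1, PySem.List.pyGetD_natCast, PySem.List.getD_map_range _ _ _ _ hc']

lemma fill_inner (cs : List Char) (R : Nat) (hR : 2 ≤ R) (r : Nat) (hr : r < R)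
    (c : Nat) (hc : c ≤ cs.length) :
    ((List.range c).map (fun k => ((k : Nat) : Int))).foldl
      (fun (st : List (List Char) × Int) cI =>
        if PySem.List.pyGetD (PySem.List.pyGetD st.1 ((r : Nat) : Int) []) cI ' ' = '*' then
          (st.1.set ((r : Nat) : Int).toNat
             ((PySem.List.pyGetD st.1 ((r : Nat) : Int) []).set cI.toNat
               (PySem.List.pyGetD
                 ((List.range cs.length).map (fun j => cs.getD (gidx R cs.length j) ' '))
                 st.2 ' ')), st.2 + 1)
        else st)
      (gridF cs R r 0, ((strtZ R cs.length r : Nat) : Int))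
    = (gridF cs R r c, ((strtZ R cs.length r + rnkZ R r c : Nat) : Int)) := by
  induction c with
  | zero => simp [rnkZ]
  | succ c ih =>
    rw [List.range_succ, List.map_append, List.foldl_append, ih (by omega)]
    simp only [List.map_cons, List.map_nil, List.foldl_cons, List.foldl_nil]
    have hcN : c < cs.length := by omega
    rw [gridF_entry cs R r c r c hr hcN,
        if_neg (show ¬(r < r ∨ (r = r ∧ c < c)) by omega)]
    by_cases hzc : zrow R c = r
    · rw [if_pos hzc, if_pos (show ('*':Char) = '*' from rfl)]
      have hidx : strtZ R cs.length r + rnkZ R r c = pvIdx R cs.length c := by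
        unfold pvIdx; rw [hzc]
      have hint : PySem.List.pyGetD
          ((List.range cs.length).map (fun j => cs.getD (gidx R cs.length j) ' '))
          ((strtZ R cs.length r + rnkZ R r c : Nat) : Int) ' ' = fillChar cs R c := by
        rw [PySem.List.pyGetD_natCast, hidx,
            PySem.List.getD_map_range _ _ _ _ (pvIdx_lt R cs.length c hR hcN)]
        rfl
      rw [hint]
      refine Prod.ext ?_ ?_
      · simp only [Int.toNat_natCast]
        unfold gridF
        have hrowF : PySem.List.pyGetD
            ((List.range R).map (fun r' => (List.range cs.length).map
              (fun cc => if zrow R cc = r' then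
                (if r' < r ∨ (r' = r ∧ cc < c) then fillChar cs R cc else '*') else '\n')))
            ((r : Nat) : Int) []
            = (List.range cs.length).map
              (fun cc => if zrow R cc = r then
                (if r < r ∨ (r = r ∧ cc < c) then fillChar cs R cc else '*') else '\n') := by
          rw [PySem.List.pyGetD_natCast, PySem.List.getD_map_range _ _ _ _ hr]
        rw [hrowF, set_map_range, set_map_range]
        apply List.map_congr_left
        intro r' hr'
        simp only [List.mem_range] at hr'
        by_cases h : r' = r
        · subst h
          rw [if_pos rfl]
          apply List.map_congr_left
          intro cc hcc
          simp only [List.mem_range] at hcc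
          by_cases h2 : cc = c
          · subst h2
            rw [if_pos rfl, if_pos hzc,
                if_pos (show r' < r' ∨ (r' = r' ∧ cc < cc + 1) from Or.inr ⟨rfl, by omega⟩)]
          · rw [if_neg h2]
            by_cases h3 : zrow R cc = r'
            · rw [if_pos h3, if_pos h3]
              by_cases h4 : r' < r' ∨ (r' = r' ∧ cc < c)
              · rw [if_pos h4,
                    if_pos (show r' < r' ∨ (r' = r' ∧ cc < c + 1) from Or.inr ⟨rfl, by
                      rcases h4 with h4 | ⟨_, h4⟩
                      · omega
                      · omega⟩)]
              · rw [if_neg h4, if_neg (by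
                  intro hh
                  apply h4
                  rcases hh with hh | ⟨_, hh⟩
                  · omega
                  · exact Or.inr ⟨rfl, by omega⟩)]
            · rw [if_neg h3, if_neg h3]
        · rw [if_neg h]
          apply List.map_congr_left
          intro cc hcc
          by_cases h3 : zrow R cc = r'
          · rw [if_pos h3, if_pos h3]
            by_cases h4 : r' < r ∨ (r' = r ∧ cc < c)
            · rw [if_pos h4, if_pos (show r' < r ∨ (r' = r ∧ cc < c + 1) by
                rcases h4 with h4 | ⟨h4a, h4b⟩
                · exact Or.inl h4
                · exact Or.inr ⟨h4a, by omega⟩)]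
            · rw [if_neg h4, if_neg (by
                intro hh
                apply h4
                rcases hh with hh | ⟨hha, hhb⟩
                · exact Or.inl hh
                · exact Or.inr ⟨hha, by omega⟩)]
          · rw [if_neg h3, if_neg h3]
      · simp only []
        rw [rnk_succ, if_pos hzc]
        push_cast; ring
    · rw [if_neg hzc, if_neg (show ¬(('\n':Char) = '*') by decide)]
      rw [rnk_succ, if_neg hzc]
      refine Prod.ext ?_ (by simp)
      simp only []
      unfold gridF
      apply List.map_congr_left
      intro r' hr'
      apply List.map_congr_left
      intro cc hcc
      by_cases h3 : zrow R cc = r'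
      · rw [if_pos h3, if_pos h3]
        by_cases h4 : r' < r ∨ (r' = r ∧ cc < c)
        · rw [if_pos h4, if_pos (by rcases h4 with h4 | h4; omega; right; omega)]
        · rw [if_neg h4, if_neg (by
            intro hh; apply h4
            rcases hh with hh | ⟨hh1, hh2⟩
            · omega
            · right
              refine ⟨hh1, ?_⟩
              rcases Nat.lt_or_ge cc c with h5 | h5
              · exact h5
              · exfalso
                have : cc = c := by omega
                subst this
                rw [hh1] at h3
                exact hzc h3)]
      · rw [if_neg h3, if_neg h3]

lemma gridF_col_N (cs : List Char) (R r : Nat) :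
    gridF cs R r cs.length = gridF cs R (r+1) 0 := by
  unfold gridF
  apply List.map_congr_left
  intro r' _
  apply List.map_congr_left
  intro cc hcc
  simp only [List.mem_range] at hcc
  by_cases h3 : zrow R cc = r'
  · rw [if_pos h3, if_pos h3]
    by_cases h4 : r' < r ∨ (r' = r ∧ cc < cs.length)
    · rw [if_pos h4, if_pos (show r' < r + 1 ∨ (r' = r + 1 ∧ cc < 0) from Or.inl (by omega))]
    · rw [if_neg h4, if_neg (by
        intro hh
        apply h4
        rcases hh with hh | ⟨_, hh⟩
        · rcases Nat.lt_or_ge r' r with h5 | h5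
          · exact Or.inl h5
          · exact Or.inr ⟨by omega, hcc⟩
        · omega)]
  · rw [if_neg h3, if_neg h3]

lemma gridM_eq_gridF0 (cs : List Char) (R : Nat) :
    gridM R cs.length cs.length = gridF cs R 0 0 := by
  unfold gridM gridF
  apply List.map_congr_left
  intro r' _
  apply List.map_congr_left
  intro cc hcc
  simp only [List.mem_range] at hcc
  by_cases h3 : zrow R cc = r'
  · rw [if_pos (show cc < cs.length ∧ zrow R cc = r' from ⟨hcc, h3⟩), if_pos h3,
        if_neg (show ¬(r' < 0 ∨ (r' = 0 ∧ cc < 0)) by omega)]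
  · rw [if_neg (show ¬(cc < cs.length ∧ zrow R cc = r') from fun hh => h3 hh.2), if_neg h3]

lemma fill_outer (cs : List Char) (R : Nat) (hR : 2 ≤ R) (B : Nat) (hB : B ≤ R) :
    ((List.range B).map (fun k => ((k : Nat) : Int))).foldl
      (fun (st : List (List Char) × Int) rI =>
        ((List.range cs.length).map (fun k => ((k : Nat) : Int))).foldl
          (fun (st : List (List Char) × Int) cI =>
            if PySem.List.pyGetD (PySem.List.pyGetD st.1 rI []) cI ' ' = '*' then
              (st.1.set rI.toNat ((PySem.List.pyGetD st.1 rI []).set cI.toNat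
                (PySem.List.pyGetD
                  ((List.range cs.length).map (fun j => cs.getD (gidx R cs.length j) ' '))
                  st.2 ' ')), st.2 + 1)
            else st) st)
      (gridF cs R 0 0, (0:Int))
    = (gridF cs R B 0, ((strtZ R cs.length B : Nat) : Int)) := by
  induction B with
  | zero => simp [strtZ_zero]
  | succ B ih =>
    rw [List.range_succ, List.map_append, List.foldl_append, ih (by omega)]
    simp only [List.map_cons, List.map_nil, List.foldl_cons, List.foldl_nil]
    rw [fill_inner cs R hR B (by omega) cs.length le_rfl]
    rw [gridF_col_N, ← strtZ_succ]

lemma A_char (ciphertext : String) (R : Nat) (hR : 2 ≤ R) :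
    double_rail_fence_decrypt ciphertext (R:Int)
      = String.ofList ((List.range ciphertext.toList.length).map
          (fillChar ciphertext.toList R)) := by
  simp only [double_rail_fence_decrypt, PySem.List.pyRange_zero_natCast, Int.toNat_natCast]
  rw [col_lengths_eq R ciphertext.toList.length hR,
      blocks_fold ciphertext.toList (lenB R ciphertext.toList.length)
        (offB R ciphertext.toList.length) (offB_zero _ _) (offB_succ _ _) R]
  simp only []
  rw [show (List.range R).map (fun b => (ciphertext.toList.drop
        (offB R ciphertext.toList.length b)).take (lenB R ciphertext.toList.length b))
      = blocksE R ciphertext.toList from rfl]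
  rw [ip_fold ciphertext.toList R hR ciphertext.toList.length le_rfl]
  simp only []
  have hint : (List.range ciphertext.toList.length).map
      (fun j => if j < ciphertext.toList.length
        then ciphertext.toList.getD (gidx R ciphertext.toList.length j) ' ' else ' ')
      = (List.range ciphertext.toList.length).map
        (fun j => ciphertext.toList.getD (gidx R ciphertext.toList.length j) ' ') := by
    apply List.map_congr_left
    intro j hj
    simp only [List.mem_range] at hj
    rw [if_pos hj]
  rw [hint]
  have hmark := zig_fold R hR
    (fun (g : List (List Char)) row col =>
      g.set row.toNat ((PySem.List.pyGetD g row []).set col.toNat '*'))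
    (List.replicate R (List.replicate ciphertext.toList.length '\n'))
    ciphertext.toList.length
  simp only [] at hmark
  rw [hmark]
  simp only []
  rw [mark_fold R ciphertext.toList.length hR ciphertext.toList.length le_rfl,
      gridM_eq_gridF0 ciphertext.toList R]
  rw [fill_outer ciphertext.toList R hR R le_rfl]
  simp only []
  have hread := zig_fold R hR
    (fun (acc : List Char) row col =>
      acc ++ [PySem.List.pyGetD (PySem.List.pyGetD (gridF ciphertext.toList R R 0) row []) col ' '])
    ([] : List Char) ciphertext.toList.length
  simp only [] at hread
  rw [hread]
  simp only []
  rw [PySem.List.foldl_append_singleton_eq_map, List.nil_append]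
  congr 1
  apply List.map_congr_left
  intro i hi
  simp only [List.mem_range] at hi
  rw [gridF_entry ciphertext.toList R R 0 (zrow R i) i (zrow_lt R i hR) hi,
      if_pos rfl, if_pos (Or.inl (zrow_lt R i hR))]

lemma B_char (ciphertext : String) (R : Nat) (hR : 2 ≤ R)
    (hN : 2 ≤ ciphertext.toList.length) :
    double_rail_fence_decrypt_alt ciphertext (R:Int)
      = String.ofList ((List.range ciphertext.toList.length).map
          (fillChar ciphertext.toList R)) := by
  simp only [double_rail_fence_decrypt_alt, PySem.List.pyRange_zero_natCast]
  rw [if_neg (show ¬((ciphertext.toList.length : Int) ≤ 1) by omega)]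
  rw [List.map_map]
  congr 1
  apply List.map_congr_left
  intro i hi
  simp only [List.mem_range] at hi
  simp only [Function.comp]
  have hcyc : (2 * (R:Int) - 2) = ((2*R-2 : Nat) : Int) := by omega
  rw [hcyc, PySem.Int.mod_natCast i (2*R-2), PySem.Int.floordiv_natCast i (2*R-2),
      PySem.Int.mod_natCast ciphertext.toList.length (2*R-2),
      PySem.Int.floordiv_natCast ciphertext.toList.length (2*R-2),
      PySem.Int.mod_natCast ciphertext.toList.length R,
      PySem.Int.floordiv_natCast ciphertext.toList.length R]
  have hrow : (if ((i % (2*R-2) : Nat) : Int) < (R:Int)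
        then ((i % (2*R-2) : Nat) : Int)
        else ((2*R-2 : Nat) : Int) - ((i % (2*R-2) : Nat) : Int))
      = ((zrow R i : Nat) : Int) := by
    have hmlt : i % (2*R-2) < 2*R-2 := Nat.mod_lt i (by omega)
    by_cases h : i % (2*R-2) < R
    · rw [if_pos (by omega), show zrow R i = i % (2*R-2) from by unfold zrow; rw [if_pos h]]
    · rw [if_neg (by omega), show zrow R i = 2*R-2 - i % (2*R-2) from by unfold zrow; rw [if_neg h]]
      omega
  rw [hrow]
  have hrnk := rnkZ_closed R i hR
  have hmlt : i % (2*R-2) < 2*R-2 := Nat.mod_lt i (by omega)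
  have hzc := zrow_cases R i
  have hK : (if ((zrow R i : Nat) : Int) = 0 then ((i / (2*R-2) : Nat) : Int)
      else ((ciphertext.toList.length / (2*R-2) : Nat) : Int) * (2 * ((zrow R i : Nat) : Int) - 1)
        + min ((ciphertext.toList.length % (2*R-2) : Nat) : Int) ((zrow R i : Nat) : Int)
        + max 0 (((ciphertext.toList.length % (2*R-2) : Nat) : Int)
            - (((2*R-2 : Nat) : Int) - ((zrow R i : Nat) : Int) + 1))
        + (((i / (2*R-2) : Nat) : Int) * (if ((zrow R i : Nat) : Int) = (R:Int) - 1 then 1 else 2)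
           + (if ((i % (2*R-2) : Nat) : Int) < (R:Int) then 0 else 1)))
      = ((pvIdx R ciphertext.toList.length i : Nat) : Int) := by
    by_cases hz0 : zrow R i = 0
    · rw [if_pos (by omega)]
      have h0 : i % (2*R-2) = 0 := by omega
      rw [if_pos (Or.inl hz0), if_pos (by omega)] at hrnk
      rw [hz0] at hrnk
      unfold pvIdx
      rw [hz0, strtZ_zero]
      omega
    · rw [if_neg (by omega)]
      have hw1 : 1 ≤ zrow R i := by omega
      have hw2 : zrow R i < R := zrow_lt R i hR
      have hstrt := strtZ_closed R ciphertext.toList.length (zrow R i) hR hw1 hw2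
      have hp1 : ((ciphertext.toList.length / (2*R-2) * (2 * zrow R i - 1) : Nat) : Int)
          = ((ciphertext.toList.length / (2*R-2) : Nat) : Int) * (2 * ((zrow R i : Nat) : Int) - 1) := by
        rw [Nat.cast_mul]
        have h1 : (((2 * zrow R i - 1 : Nat)) : Int) = 2 * ((zrow R i : Nat) : Int) - 1 := by omega
        rw [h1]
      unfold pvIdx
      by_cases hbot : zrow R i = R-1
      · rw [if_pos (by omega)]
        rw [if_pos (Or.inr hbot)] at hrnk
        by_cases hlo : i % (2*R-2) < R
        · rw [if_pos (by omega)]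
          rw [if_pos (by omega)] at hrnk
          omega
        · rw [if_neg (by omega)]
          rw [if_neg (by omega)] at hrnk
          omega
      · rw [if_neg (by omega)]
        rw [if_neg (by
          intro hh
          rcases hh with hh | hh
          · exact hz0 hh
          · exact hbot hh)] at hrnk
        by_cases hlo : i % (2*R-2) < R
        · rw [if_pos (by omega)]
          rw [if_pos (by omega)] at hrnk
          omega
        · rw [if_neg (by omega)]
          rw [if_neg (by omega)] at hrnk
          omega
  rw [hK, PySem.Int.mod_natCast (pvIdx R ciphertext.toList.length i) R,
      PySem.Int.floordiv_natCast (pvIdx R ciphertext.toList.length i) R]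
  have hg : ((pvIdx R ciphertext.toList.length i % R : Nat) : Int)
        * ((ciphertext.toList.length / R : Nat) : Int)
      + min ((pvIdx R ciphertext.toList.length i % R : Nat) : Int)
          ((ciphertext.toList.length % R : Nat) : Int)
      + ((pvIdx R ciphertext.toList.length i / R : Nat) : Int)
      = ((gidx R ciphertext.toList.length (pvIdx R ciphertext.toList.length i) : Nat) : Int) := by
    unfold gidx
    push_cast
    ring
  rw [hg, PySem.List.pyGetD_natCast]
  rfl

lemma B_small (ciphertext : String) (rails : Int) (h : ciphertext.toList.length ≤ 1) :
    double_rail_fence_decrypt_alt ciphertext rails = ciphertext := by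
  simp only [double_rail_fence_decrypt_alt]
  rw [if_pos (by omega : ((ciphertext.toList.length : Nat) : Int) ≤ 1)]

lemma zrow_zero (R : Nat) (hR : 2 ≤ R) : zrow R 0 = 0 := by
  unfold zrow
  simp only [Nat.zero_mod]
  rw [if_pos (by omega)]

lemma pvSmallMap (ciphertext : String) (R : Nat) (hR : 2 ≤ R)
    (hN : ciphertext.toList.length ≤ 1) :
    String.ofList ((List.range ciphertext.toList.length).map (fillChar ciphertext.toList R))
      = ciphertext := by
  by_cases h0 : ciphertext.toList.length = 0
  · rw [h0]
    have hof : ciphertext = String.ofList ciphertext.toList := by rw [String.ofList_toList]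
    conv_rhs => rw [hof]
    rw [List.length_eq_zero_iff.mp h0]
    rfl
  · have h1 : ciphertext.toList.length = 1 := by omega
    obtain ⟨c, hc⟩ := List.length_eq_one_iff.mp h1
    have hfill : fillChar ciphertext.toList R 0 = c := by
      unfold fillChar
      have hidx0 : pvIdx R ciphertext.toList.length 0 = 0 := by
        unfold pvIdx rnkZ
        rw [zrow_zero R hR, strtZ_zero]
        simp
      rw [hidx0]
      have hg0 : gidx R ciphertext.toList.length 0 = 0 := by
        unfold gidx
        simp
      rw [hg0, hc]
      rfl
    rw [h1]
    have hof : ciphertext = String.ofList ciphertext.toList := by rw [String.ofList_toList]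
    conv_rhs => rw [hof]
    rw [hc] at hfill ⊢
    simp [hfill]

lemma A_empty (ciphertext : String) (rails : Int) (h : ciphertext.toList = []) :
    double_rail_fence_decrypt ciphertext rails = ciphertext := by
  have hof : ciphertext = String.ofList ciphertext.toList := by rw [String.ofList_toList]
  conv_rhs => rw [hof]
  rw [h]
  simp only [double_rail_fence_decrypt, h, List.length_nil, Nat.cast_zero]
  have hpr : PySem.List.pyRange 0 (0:Int) 1 = [] := by
    have h2 := PySem.List.pyRange_zero_natCast 0
    simpa using h2
  rw [hpr]
  simp only [List.foldl_nil, foldl_id]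

lemma A_one (ciphertext : String) (c : Char) (h : ciphertext.toList = [c]) :
    double_rail_fence_decrypt ciphertext 1 = ciphertext := by
  have hof : ciphertext = String.ofList ciphertext.toList := by rw [String.ofList_toList]
  conv_rhs => rw [hof]
  rw [h]
  simp only [double_rail_fence_decrypt, h]
  rw [show (([c] : List Char).length : Int) = (1:Int) from rfl]
  exact congrArg String.ofList rfl

-- ===== VERDICT (by name: the statement is the Claim_ definition above) =====
theorem double_rail_fence_decrypt_spec : Claim_equal_double_rail_fence_decrypt := by
  intro ciphertext rails _ hpre
  unfold Spec_double_rail_fence_decrypt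
  by_cases hr2 : 2 ≤ rails
  · have hR2 : 2 ≤ rails.toNat := by omega
    have hcast : ((rails.toNat : Nat) : Int) = rails := Int.toNat_of_nonneg (by omega)
    rw [← hcast]
    by_cases hN : 2 ≤ ciphertext.toList.length
    · rw [A_char ciphertext rails.toNat hR2, B_char ciphertext rails.toNat hR2 hN]
    · rw [A_char ciphertext rails.toNat hR2, B_small _ _ (by omega),
          pvSmallMap ciphertext rails.toNat hR2 (by omega)]
  · rcases hpre with h | ⟨h0, _⟩ | ⟨h1, hge⟩
    · omega
    · rw [A_empty ciphertext rails (List.length_eq_zero_iff.mp h0),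
          B_small _ _ (by omega)]
    · have hrails : rails = 1 := by omega
      subst hrails
      obtain ⟨c, hc⟩ := List.length_eq_one_iff.mp h1
      rw [A_one ciphertext c hc, B_small _ _ (by omega)]
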